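-- pv_equiv track=rewrite | github.com/M-Rodrigue/L3 | Python/TD1/exercice3.py | nbr_Consonnes
-- ===== SOURCE A (Python) =====
-- points_lettres = {"A":1,"B":3,"C":3,"D":2,"E":1,"F":4,"G":2,"H":4,"I":1,"J":8,"K":10,"L":1,"M":2,"N":1,"O":1,"P":3,"Q":8,"R":1,"S":1,"T":1,"U":1,"V":4,"W":10,"X":10,"Y":10,"Z":10}
--
-- def nbr_Consonnes(motUtilisateur):
--   motUtilisateur = motUtilisateur.upper()
--   voyelles = ["A", "E", "I", "O", "U", "Y"]
--   consonnes = ["B", "C", "D", "F", "G", "H", "J", "K", "L", "M", "N", "P", "Q", "R", "S", "T", "V", "W", "X", "Y", "Z"]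
--
--   total_voyelles = 0
--   total_consonnes = 0
--   points_voyelles = 0
--   points_consonnes = 0
--
--   for lettre in motUtilisateur:
--     if lettre in voyelles:
--       total_voyelles += 1
--       points_voyelles += points_lettres.get(lettre, 0)
--     elif lettre in consonnes:
--       total_consonnes += 1
--       points_consonnes += points_lettres.get(lettre, 0)
--
--   return total_voyelles, total_consonnes, points_voyelles, points_consonnes
-- ===== SOURCE B (Python) =====
-- points_lettres = {"A":1,"B":3,"C":3,"D":2,"E":1,"F":4,"G":2,"H":4,"I":1,"J":8,"K":10,"L":1,"M":2,"N":1,"O":1,"P":3,"Q":8,"R":1,"S":1,"T":1,"U":1,"V":4,"W":10,"X":10,"Y":10,"Z":10}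
--
-- def nbr_Consonnes(motUtilisateur):
--   voyelles = ["A", "E", "I", "O", "U", "Y"]
--   # Y is deliberately absent: A's vowel test runs first, so Y is always a vowel
--   consonnes = ["B", "C", "D", "F", "G", "H", "J", "K", "L", "M", "N", "P", "Q", "R", "S", "T", "V", "W", "X", "Z"]
--
--   counts = {}
--   for lettre in motUtilisateur.upper():
--     counts[lettre] = counts.get(lettre, 0) + 1
--
--   total_voyelles = sum(counts.get(v, 0) for v in voyelles)
--   total_consonnes = sum(counts.get(c, 0) for c in consonnes)
--   points_voyelles = sum(counts.get(v, 0) * points_lettres.get(v, 0) for v in voyelles)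
--   points_consonnes = sum(counts.get(c, 0) * points_lettres.get(c, 0) for c in consonnes)
--   return total_voyelles, total_consonnes, points_voyelles, points_consonnes
-- ===== Notes on version B (the rewrite author's own statement) =====
-- stated objective: faster
-- what changed: B builds a letter-frequency dictionary in one pass and then computes each of the four results as a sum over the fixed vowel/consonant alphabet lists (consonants listed without Y, which A's vowel-first test always claims), replacing A's per-character branch-and-accumulate loop entirely.
import Mathlib
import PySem

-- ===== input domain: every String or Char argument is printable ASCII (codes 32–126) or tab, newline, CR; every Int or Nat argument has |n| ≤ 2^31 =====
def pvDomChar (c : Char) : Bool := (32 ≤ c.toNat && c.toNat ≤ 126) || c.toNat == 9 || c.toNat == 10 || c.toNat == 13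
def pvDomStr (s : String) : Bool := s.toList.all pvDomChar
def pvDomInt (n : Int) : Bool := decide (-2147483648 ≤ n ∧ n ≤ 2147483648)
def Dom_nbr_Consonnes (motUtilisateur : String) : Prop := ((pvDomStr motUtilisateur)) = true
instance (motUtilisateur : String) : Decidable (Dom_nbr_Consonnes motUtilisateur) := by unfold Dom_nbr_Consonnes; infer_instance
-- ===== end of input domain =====

-- B replaces A's per-character branch-and-accumulate loop by a frequency dictionary
-- plus four sums over the fixed alphabet lists (measured faster in a timing run).

-- ===== PORT A =====
def pvPointsLettres : PySem.Dict Char Int := PySem.Dict.ofList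
  [('A',1),('B',3),('C',3),('D',2),('E',1),('F',4),('G',2),('H',4),('I',1),('J',8),
   ('K',10),('L',1),('M',2),('N',1),('O',1),('P',3),('Q',8),('R',1),('S',1),('T',1),
   ('U',1),('V',4),('W',10),('X',10),('Y',10),('Z',10)]

def pvVoyelles : List Char := ['A','E','I','O','U','Y']

def pvConsonnes : List Char :=
  ['B','C','D','F','G','H','J','K','L','M','N','P','Q','R','S','T','V','W','X','Y','Z']

def nbr_Consonnes (motUtilisateur : String) : Int × Int × Int × Int :=
  (PySem.Str.upper motUtilisateur).toList.foldl
    (fun (acc : Int × Int × Int × Int) lettre =>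
      if lettre ∈ pvVoyelles then
        (acc.1 + 1, acc.2.1, acc.2.2.1 + pvPointsLettres.getD lettre 0, acc.2.2.2)
      else if lettre ∈ pvConsonnes then
        (acc.1, acc.2.1 + 1, acc.2.2.1, acc.2.2.2 + pvPointsLettres.getD lettre 0)
      else acc)
    (0, 0, 0, 0)

-- ===== PORT B =====
-- B's consonant list deliberately omits 'Y' (A's vowel-first test always claims it)
def pvConsonnesB : List Char :=
  ['B','C','D','F','G','H','J','K','L','M','N','P','Q','R','S','T','V','W','X','Z']

def nbr_Consonnes_alt (motUtilisateur : String) : Int × Int × Int × Int :=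
  let counts : PySem.Dict Char Int :=
    (PySem.Str.upper motUtilisateur).toList.foldl
      (fun d x => d.insert x (d.getD x 0 + 1)) PySem.Dict.empty
  let total_voyelles := (pvVoyelles.map (fun v => counts.getD v 0)).sum
  let total_consonnes := (pvConsonnesB.map (fun c => counts.getD c 0)).sum
  let points_voyelles := (pvVoyelles.map (fun v => counts.getD v 0 * pvPointsLettres.getD v 0)).sum
  let points_consonnes := (pvConsonnesB.map (fun c => counts.getD c 0 * pvPointsLettres.getD c 0)).sum
  (total_voyelles, total_consonnes, points_voyelles, points_consonnes)

-- ===== PRECONDITION & SPEC =====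
def Spec_nbr_Consonnes (motUtilisateur : String) (out : Int × Int × Int × Int) : Prop := out = nbr_Consonnes_alt motUtilisateur
instance (motUtilisateur : String) (out : Int × Int × Int × Int) : Decidable (Spec_nbr_Consonnes motUtilisateur out) := by unfold Spec_nbr_Consonnes; infer_instance

-- ===== CLAIM (what is proved, stated in full; the proofs are below) =====
def Claim_equal_nbr_Consonnes : Prop := ∀ (motUtilisateur : String), Dom_nbr_Consonnes motUtilisateur → Spec_nbr_Consonnes motUtilisateur (nbr_Consonnes motUtilisateur)

-- ===== LEMMAS AND PROOFS =====

-- per-character contribution of A's loop body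
def pvG (c : Char) : Int × Int × Int × Int :=
  if c ∈ pvVoyelles then (1, 0, pvPointsLettres.getD c 0, 0)
  else if c ∈ pvConsonnes then (0, 1, 0, pvPointsLettres.getD c 0)
  else (0, 0, 0, 0)

theorem pv_foldl_add {α M : Type} [AddCommMonoid M] (g : α → M) (l : List α) (a : M) :
    l.foldl (fun acc x => acc + g x) a = a + (l.map g).sum := by
  induction l generalizing a with
  | nil => simp
  | cons x xs ih => simp [ih, add_assoc]

theorem pv_stepA (acc : Int × Int × Int × Int) (x : Char) :
    (if x ∈ pvVoyelles then
        (acc.1 + 1, acc.2.1, acc.2.2.1 + pvPointsLettres.getD x 0, acc.2.2.2)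
      else if x ∈ pvConsonnes then
        (acc.1, acc.2.1 + 1, acc.2.2.1, acc.2.2.2 + pvPointsLettres.getD x 0)
      else acc) = acc + pvG x := by
  obtain ⟨a, b, c, d⟩ := acc
  unfold pvG
  split_ifs <;> simp

-- pvG expressed through the two disjoint indicator sets B uses
theorem pvG_eq (x : Char) :
    pvG x = ((if x ∈ pvVoyelles then (1:Int) else 0),
             (if x ∈ pvConsonnesB then (1:Int) else 0),
             (if x ∈ pvVoyelles then pvPointsLettres.getD x 0 else 0),
             (if x ∈ pvConsonnesB then pvPointsLettres.getD x 0 else 0)) := by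
  by_cases hV : x ∈ pvVoyelles
  · have h := hV
    simp only [pvVoyelles, List.mem_cons, List.not_mem_nil, or_false] at h
    rcases h with rfl|rfl|rfl|rfl|rfl|rfl <;> decide
  · by_cases hC : x ∈ pvConsonnes
    · have h := hC
      simp only [pvConsonnes, List.mem_cons, List.not_mem_nil, or_false] at h
      rcases h with rfl|rfl|rfl|rfl|rfl|rfl|rfl|rfl|rfl|rfl|rfl|rfl|rfl|rfl|rfl|rfl|rfl|rfl|rfl|rfl|rfl <;> decide
    · have hB : x ∉ pvConsonnesB := by
        intro h
        apply hC
        simp only [pvConsonnesB, List.mem_cons, List.not_mem_nil, or_false] at h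
        rcases h with rfl|rfl|rfl|rfl|rfl|rfl|rfl|rfl|rfl|rfl|rfl|rfl|rfl|rfl|rfl|rfl|rfl|rfl|rfl|rfl <;> decide
      simp [pvG, hV, hC, hB]

def pvSumC (L : List Char) (f : Char → Int) (l : List Char) : Int :=
  (L.map (fun v => (l.count v : Int) * f v)).sum

theorem pv_sum_ite_zero (L : List Char) (f : Char → Int) (x : Char) (hx : x ∉ L) :
    (L.map fun v => if v = x then f v else 0).sum = 0 := by
  induction L with
  | nil => simp
  | cons a L ih =>
      simp only [List.mem_cons, not_or] at hx
      have hax : ¬ a = x := fun h => hx.1 h.symm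
      simp [hax, ih hx.2]

theorem pv_sum_ite_single (L : List Char) (hL : L.Nodup) (f : Char → Int) (x : Char) :
    (L.map fun v => if v = x then f v else 0).sum = if x ∈ L then f x else 0 := by
  induction L with
  | nil => simp
  | cons a L ih =>
      rcases List.nodup_cons.mp hL with ⟨ha, hL'⟩
      by_cases hax : a = x
      · subst hax
        simp [pv_sum_ite_zero L f a ha]
      · simp only [List.map_cons, List.sum_cons, if_neg hax, zero_add, ih hL', List.mem_cons]
        simp [Ne.symm hax]

theorem pvSumC_cons (L : List Char) (hL : L.Nodup) (f : Char → Int) (x : Char) (l : List Char) :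
    pvSumC L f (x :: l) = pvSumC L f l + (if x ∈ L then f x else 0) := by
  unfold pvSumC
  have hpt : ∀ v : Char, (((x :: l).count v : Nat) : Int) * f v
      = ((l.count v : Nat) : Int) * f v + (if v = x then f v else 0) := by
    intro v
    by_cases hvx : v = x
    · subst hvx; simp; ring
    · have hxv : ¬ x = v := fun h => hvx h.symm
      simp [hvx, hxv]
  simp only [hpt]
  rw [← pv_sum_ite_single L hL f x]
  induction L with
  | nil => simp
  | cons a L ih => simp [List.map_cons, List.sum_cons] at *; omega

theorem pv_mapG_sum (l : List Char) :
    (l.map pvG).sum =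
      (pvSumC pvVoyelles (fun _ => 1) l,
       pvSumC pvConsonnesB (fun _ => 1) l,
       pvSumC pvVoyelles (fun v => pvPointsLettres.getD v 0) l,
       pvSumC pvConsonnesB (fun v => pvPointsLettres.getD v 0) l) := by
  induction l with
  | nil => simp [pvSumC, Prod.ext_iff]
  | cons x l ih =>
      have hV : pvVoyelles.Nodup := by decide
      have hC : pvConsonnesB.Nodup := by decide
      rw [List.map_cons, List.sum_cons, ih, pvG_eq,
        pvSumC_cons _ hV _ x l, pvSumC_cons _ hC _ x l,
        pvSumC_cons _ hV _ x l, pvSumC_cons _ hC _ x l]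
      simp [Prod.ext_iff]
      refine ⟨by ring, by ring, by ring, by ring⟩

-- ===== VERDICT (by name: the statement is the Claim_ definition above) =====
theorem nbr_Consonnes_spec : Claim_equal_nbr_Consonnes := by
  intro mot _
  unfold Spec_nbr_Consonnes nbr_Consonnes nbr_Consonnes_alt
  rw [PySem.Dict.foldl_insert_getD_add_one_eq_counter]
  set l := (PySem.Str.upper mot).toList with hl
  simp only [pv_stepA]
  rw [pv_foldl_add, pv_mapG_sum]
  simp [PySem.Dict.getD_counter, pvSumC]
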